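-- pv_equiv track=rewrite | github.com/wit221/Rhythm-of-Economics | Rhythm Generator.py | IOIHisto
-- ===== SOURCE A (Python) =====
-- def IOIHisto(rhythm):
--     IOIList=[]
--     indices=[]
--     for i in range(len(rhythm)):
--         if rhythm[i] == 'x':
--             indices.append(i)
--     for i in range(len(indices)-1):
--         IOIList.append(indices[i+1]-indices[i])
--     IOIList.append(len(rhythm)-indices[-1])
--     IOIList.sort()
--     return IOIList
-- ===== SOURCE B (Python) =====
-- def IOIHisto(rhythm):
--     res = []
--     prev = None
--     for i, c in enumerate(rhythm):
--         if c == 'x':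
--             if prev is not None:
--                 res.append(i - prev)
--             prev = i
--     if prev is None:
--         return []
--     res.append(len(rhythm) - prev)
--     res.sort()
--     return res
-- ===== Notes on version B (the rewrite author's own statement) =====
-- stated objective: simpler
-- what changed: Single fused pass over the string keeping only the previously seen onset index replaces A's two phases (build a full indices list, then re-scan it by index for pairwise differences); the intermediate indices list disappears.
import Mathlib
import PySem

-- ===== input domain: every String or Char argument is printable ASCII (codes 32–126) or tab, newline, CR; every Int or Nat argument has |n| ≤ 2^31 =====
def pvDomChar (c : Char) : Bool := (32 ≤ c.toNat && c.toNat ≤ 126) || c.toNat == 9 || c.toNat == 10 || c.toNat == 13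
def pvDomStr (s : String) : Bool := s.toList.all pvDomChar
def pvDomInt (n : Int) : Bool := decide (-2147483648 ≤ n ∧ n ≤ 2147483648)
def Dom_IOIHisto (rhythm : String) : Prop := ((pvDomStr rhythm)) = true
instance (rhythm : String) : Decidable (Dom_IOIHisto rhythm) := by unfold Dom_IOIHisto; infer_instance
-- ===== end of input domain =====

-- B fuses A's two phases (collect indices of 'x', then re-scan them for pairwise differences)
-- into one pass keeping only the previous 'x' index; objective: simpler (same asymptotic cost).

-- ===== PORT A =====
def IOIHisto (rhythm : String) : List Int :=
  let cs := rhythm.toList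
  let n : Int := cs.length
  let indices : List Int :=
    (PySem.List.pyRange 0 n 1).foldl
      (fun acc i => if PySem.List.pyGetD cs i ' ' = 'x' then acc ++ [i] else acc) []
  let ioiList : List Int :=
    (PySem.List.pyRange 0 ((indices.length : Int) - 1) 1).foldl
      (fun acc i => acc ++ [PySem.List.pyGetD indices (i + 1) 0 - PySem.List.pyGetD indices i 0]) []
  let ioiList := ioiList ++ [n - PySem.List.pyGetD indices (-1) 0]
  PySem.List.sorted ioiList (fun x => x) false

-- ===== PORT B =====
-- loop body of B's single pass: on an 'x', record the interval from the previous 'x' (if any)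
def pvStep (st : List Int × Option Int) (p : Int × Char) : List Int × Option Int :=
  if p.2 = 'x' then
    ((match st.2 with
      | some pv => st.1 ++ [p.1 - pv]
      | none => st.1), some p.1)
  else st

def IOIHisto_alt (rhythm : String) : List Int :=
  let cs := rhythm.toList
  let r := (PySem.List.enumerate cs 0).foldl pvStep ([], none)
  match r.2 with
  | none => []
  | some pv => PySem.List.sorted (r.1 ++ [(cs.length : Int) - pv]) (fun x => x) false

-- ===== PRECONDITION & SPEC =====
-- Pre_ excludes exactly the strings with no 'x', on which Python A raises IndexError (indices[-1]).
def Pre_IOIHisto (rhythm : String) : Prop := 'x' ∈ rhythm.toList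
instance (rhythm : String) : Decidable (Pre_IOIHisto rhythm) := by unfold Pre_IOIHisto; infer_instance
def pvWitness_IOIHisto : String := "x..x.x"

def Spec_IOIHisto (rhythm : String) (out : List Int) : Prop := out = IOIHisto_alt rhythm
instance (rhythm : String) (out : List Int) : Decidable (Spec_IOIHisto rhythm out) := by unfold Spec_IOIHisto; infer_instance

-- ===== CLAIM (what is proved, stated in full; the proofs are below) =====
def Claim_equal_IOIHisto : Prop := ∀ (rhythm : String), Dom_IOIHisto rhythm → Pre_IOIHisto rhythm → Spec_IOIHisto rhythm (IOIHisto rhythm)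

-- ===== LEMMAS AND PROOFS =====

-- positions (from offset s) of the 'x' characters, structurally
def pvXlist : List Char → Int → List Int
  | [], _ => []
  | c :: t, s => if c = 'x' then s :: pvXlist t (s + 1) else pvXlist t (s + 1)

-- successive differences of a list
def pvDiffs : List Int → List Int
  | a :: b :: t => (b - a) :: pvDiffs (b :: t)
  | _ => []

theorem pvXlist_ne_nil (cs : List Char) (s : Int) (h : 'x' ∈ cs) : pvXlist cs s ≠ [] := by
  induction cs generalizing s with
  | nil => simp at h
  | cons c t ih =>
    rcases List.mem_cons.1 h with h | h
    · simp [pvXlist, ← h]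
    · by_cases hc : c = 'x' <;> simp [pvXlist, hc, ih _ h]

theorem pv_filter_enum (cs : List Char) (s : Int) :
    ((PySem.List.enumerate cs s).filter (fun p => p.2 = 'x')).map (·.1) = pvXlist cs s := by
  induction cs generalizing s with
  | nil => simp [PySem.List.enumerate_nil, pvXlist]
  | cons c t ih =>
    by_cases hc : c = 'x' <;>
      simp [PySem.List.enumerate_cons, pvXlist, hc, ih]

-- A's index-collecting loop, as a filter over the range, equals pvXlist
theorem pv_indices_eq (cs : List Char) :
    ((PySem.List.pyRange 0 (cs.length : Int) 1).filter
        (fun i => PySem.List.pyGetD cs i ' ' = 'x')) = pvXlist cs 0 := by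
  have he := PySem.List.enumerate_eq_map_pyRange cs ' '
  have h := pv_filter_enum cs 0
  rw [he] at h
  rw [List.filter_map, List.map_map] at h
  simpa [Function.comp_def] using h

-- A's second loop: the map of pairwise differences over range(len-1) is pvDiffs (Nat form)
theorem pv_mapdiffs_nat (I : List Int) :
    (List.range (I.length - 1)).map (fun k => I.getD (k + 1) 0 - I.getD k 0) = pvDiffs I := by
  induction I with
  | nil => simp [pvDiffs]
  | cons a t ih =>
    cases t with
    | nil => simp [pvDiffs]
    | cons b u =>
      have hlen : (a :: b :: u).length - 1 = (b :: u).length - 1 + 1 := by simp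
      rw [hlen, List.range_succ_eq_map, List.map_cons, List.map_map]
      simp only [pvDiffs]
      rw [← ih]
      simp [Function.comp_def, Nat.succ_eq_add_one]

-- bridge to A's pyRange/pyGetD form
theorem pv_mapdiffs (I : List Int) :
    (PySem.List.pyRange 0 ((I.length : Int) - 1) 1).map
        (fun i => PySem.List.pyGetD I (i + 1) 0 - PySem.List.pyGetD I i 0) = pvDiffs I := by
  rw [PySem.List.pyRange_one, List.map_map]
  have : ((I.length : Int) - 1 - 0).toNat = I.length - 1 := by omega
  rw [this]
  rw [← pv_mapdiffs_nat I]
  apply List.map_congr_left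
  intro k _
  have h1 : (0 : Int) + (k : Int) + 1 = ((k + 1 : Nat) : Int) := by omega
  have h2 : (0 : Int) + (k : Int) = ((k : Nat) : Int) := by omega
  simp only [Function.comp_apply]
  rw [h1, h2, PySem.List.pyGetD_natCast, PySem.List.pyGetD_natCast]

-- B's loop invariant, 'prev' already set
theorem pv_fold_some (cs : List Char) (s : Int) (acc : List Int) (p : Int) :
    (PySem.List.enumerate cs s).foldl pvStep (acc, some p)
      = (acc ++ pvDiffs (p :: pvXlist cs s), (p :: pvXlist cs s).getLast?) := by
  induction cs generalizing s acc p with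
  | nil => simp [PySem.List.enumerate_nil, pvXlist, pvDiffs]
  | cons c t ih =>
    by_cases hc : c = 'x'
    · subst hc
      rw [PySem.List.enumerate_cons, List.foldl_cons]
      simp only [pvStep]
      rw [if_pos trivial, ih]
      simp [pvXlist, pvDiffs, List.getLast?_cons_cons]
    · rw [PySem.List.enumerate_cons, List.foldl_cons]
      simp only [pvStep]
      rw [if_neg (by simpa using hc), ih]
      simp [pvXlist, hc]

-- B's loop invariant from the initial state
theorem pv_fold_none (cs : List Char) (s : Int) :
    (PySem.List.enumerate cs s).foldl pvStep ([], none)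
      = (pvDiffs (pvXlist cs s), (pvXlist cs s).getLast?) := by
  induction cs generalizing s with
  | nil => simp [PySem.List.enumerate_nil, pvXlist, pvDiffs]
  | cons c t ih =>
    by_cases hc : c = 'x'
    · subst hc
      rw [PySem.List.enumerate_cons, List.foldl_cons]
      simp only [pvStep]
      rw [if_pos trivial, pv_fold_some]
      simp [pvXlist]
    · rw [PySem.List.enumerate_cons, List.foldl_cons]
      simp only [pvStep]
      rw [if_neg (by simpa using hc), ih]
      simp [pvXlist, hc]

-- ===== VERDICT (by name: the statement is the Claim_ definition above) =====
theorem IOIHisto_spec : Claim_equal_IOIHisto := by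
  intro rhythm _ hpre
  unfold Spec_IOIHisto IOIHisto IOIHisto_alt
  dsimp only
  set cs := rhythm.toList with hcs
  set X := pvXlist cs 0 with hX
  have hne : X ≠ [] := pvXlist_ne_nil cs 0 hpre
  have hlast : X.getLast? = some (X.getLast hne) := List.getLast?_eq_some_getLast hne
  -- A's pieces
  rw [PySem.List.foldl_append_ite_eq_filter, pv_indices_eq, ← hX,
    PySem.List.foldl_append_singleton_eq_map]
  simp only [List.nil_append]
  rw [pv_mapdiffs, PySem.List.pyGetD_neg_one X 0 hne]
  -- B's pieces
  rw [pv_fold_none, ← hX, hlast]
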